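-- pv_equiv track=rewrite | github.com/senivan/Project-Cortana | week2/aliens/aliens_original.py | rescue_people
-- ===== SOURCE A (Python) =====
-- def rescue_people(smarties, limit_iq):
--     '''
--     function to present a last of people, where one list means that this
--     people have a trip in one time
--     >>> rescue_people({'AB': 200, 'BC': 200, 'ID': 250, 'IB': 250, 'OC': 300, \
-- 'OD': 300, 'i': 350}, 550)
--     (4, [['i', 'AB'], ['OC', 'IB'], ['OD', 'ID'], ['BC']])
--     '''
--     if len(smarties) == 0:
--         return 0, []
--     sum_ = 0
--     chec = []
--     all_trip = []
--     sort_dct = {}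
--     for k, v in sorted(smarties.items(), key=lambda item: (-item[1], item[0])):
--         if v <= limit_iq:
--             sort_dct[k] = v
--     for key, value in sort_dct.items():
--         if key not in chec:
--             sum_ = value
--             one_trip = []
--             one_trip.append(key)
--             chec.append(key)
--             for k, v in sort_dct.items():
--                 if value <= limit_iq and v <= limit_iq and key != k and k not in chec:
--                     if sum_ + v <= limit_iq:
--                         sum_ += v
--                         one_trip.append(k)
--                         chec.append(k)
--             all_trip.append(one_trip)
--     first = len(all_trip)
--     return first, all_trip
-- ===== SOURCE B (Python) =====
-- def rescue_people(smarties, limit_iq):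
--     people = [(k, v) for k, v in sorted(smarties.items(),
--                                         key=lambda item: (-item[1], item[0]))
--               if v <= limit_iq]
--     trips = []  # open trips as [running_sum, members] pairs
--     for k, v in people:
--         for t in trips:
--             if t[0] + v <= limit_iq:
--                 t[0] += v
--                 t[1].append(k)
--                 break
--         else:
--             trips.append([v, [k]])
--     return len(trips), [t[1] for t in trips]
-- ===== Notes on version B (the rewrite author's own statement) =====
-- stated objective: faster
-- what changed: A repeatedly opens a trip and rescans the whole sorted dict while tracking assigned keys in a growing `chec` list (a linear membership scan per pair); B makes one pass over the sorted people and first-fits each person into a list of open (running_sum, members) trips, with no assigned-key bookkeeping and no rescans.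
import Mathlib
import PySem

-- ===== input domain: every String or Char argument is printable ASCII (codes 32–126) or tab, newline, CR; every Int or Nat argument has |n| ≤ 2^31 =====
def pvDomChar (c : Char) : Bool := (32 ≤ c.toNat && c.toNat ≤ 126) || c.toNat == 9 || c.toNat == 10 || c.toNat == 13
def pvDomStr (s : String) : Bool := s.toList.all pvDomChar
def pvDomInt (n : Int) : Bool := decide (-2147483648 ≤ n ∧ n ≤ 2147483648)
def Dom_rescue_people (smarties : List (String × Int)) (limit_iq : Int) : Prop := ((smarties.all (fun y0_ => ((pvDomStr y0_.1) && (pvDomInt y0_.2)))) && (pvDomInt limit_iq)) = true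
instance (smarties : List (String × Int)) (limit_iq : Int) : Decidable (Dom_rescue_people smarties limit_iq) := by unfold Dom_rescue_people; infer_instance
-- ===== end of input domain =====

-- B replaces A's nested rescans (open a trip, re-scan the whole dict, track assigned keys in a
-- `chec` list) by a single first-fit pass over the sorted people into a list of open trips
-- (objective: faster — drops the quadratic rescans and linear `chec` membership tests; same exact result).

-- ===== PORT A =====
-- inner loop body of A ("for k, v in sort_dct.items(): …"); state = (sum_, one_trip, chec)
def innerStepA (limit_iq : Int) (kv : String × Int) (s : Int × List String × List String)
    (kv' : String × Int) : Int × List String × List String :=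
  if kv.2 ≤ limit_iq ∧ kv'.2 ≤ limit_iq ∧ kv.1 ≠ kv'.1 ∧ kv'.1 ∉ s.2.2 then
    if s.1 + kv'.2 ≤ limit_iq then (s.1 + kv'.2, s.2.1 ++ [kv'.1], s.2.2 ++ [kv'.1])
    else s
  else s

-- outer loop body of A ("for key, value in sort_dct.items(): …"); state = (sum_, chec, all_trip)
def outerStepA (limit_iq : Int) (items : List (String × Int))
    (st : Int × List String × List (List String)) (kv : String × Int) :
    Int × List String × List (List String) :=
  if kv.1 ∈ st.2.1 then st
  else
    let r := items.foldl (innerStepA limit_iq kv) (kv.2, [kv.1], st.2.1 ++ [kv.1])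
    (r.1, r.2.2, st.2.2 ++ [r.2.1])

def rescue_people (smarties : List (String × Int)) (limit_iq : Int) : Int × List (List String) :=
  let d := PySem.Dict.ofList smarties
  if d.size = 0 then (0, [])
  else
    let sort_dct := (PySem.List.sorted2 d.items (fun item => -item.2) (fun item => item.1)).foldl
        (fun sd kv => if kv.2 ≤ limit_iq then sd.insert kv.1 kv.2 else sd) PySem.Dict.empty
    let r := sort_dct.items.foldl (outerStepA limit_iq sort_dct.items) (0, [], [])
    ((r.2.2.length : Int), r.2.2)

-- ===== PORT B =====
-- place (k, v) into the first open trip it fits, else open a new trip (the for…break/else loop)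
def firstFit (limit_iq : Int) (trips : List (Int × List String)) (k : String) (v : Int) :
    List (Int × List String) :=
  match trips with
  | [] => [(v, [k])]
  | t :: ts =>
    if t.1 + v ≤ limit_iq then (t.1 + v, t.2 ++ [k]) :: ts
    else t :: firstFit limit_iq ts k v

def rescue_people_alt (smarties : List (String × Int)) (limit_iq : Int) : Int × List (List String) :=
  let people := (PySem.List.sorted2 (PySem.Dict.ofList smarties).items
      (fun item => -item.2) (fun item => item.1)).filter (fun kv => decide (kv.2 ≤ limit_iq))
  let trips := people.foldl (fun trips kv => firstFit limit_iq trips kv.1 kv.2) []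
  ((trips.length : Int), trips.map (fun t => t.2))

-- ===== PRECONDITION & SPEC =====
def Spec_rescue_people (smarties : List (String × Int)) (limit_iq : Int) (out : Int × List (List String)) : Prop := out = rescue_people_alt smarties limit_iq
instance (smarties : List (String × Int)) (limit_iq : Int) (out : Int × List (List String)) : Decidable (Spec_rescue_people smarties limit_iq out) := by unfold Spec_rescue_people; infer_instance

-- ===== CLAIM (what is proved, stated in full; the proofs are below) =====
def Claim_equal_rescue_people : Prop := ∀ (smarties : List (String × Int)) (limit_iq : Int), Dom_rescue_people smarties limit_iq → Spec_rescue_people smarties limit_iq (rescue_people smarties limit_iq)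

-- ===== LEMMAS AND PROOFS =====

-- greedy fill of one trip: scan xs, take what still fits; returns (sum, taken keys, residue)
def pvFill (lim : Int) : Int → List (String × Int) → Int × List String × List (String × Int)
  | s, [] => (s, [], [])
  | s, (k, v) :: xs =>
    if s + v ≤ lim then
      let r := pvFill lim (s + v) xs
      (r.1, k :: r.2.1, r.2.2)
    else
      let r := pvFill lim s xs
      (r.1, r.2.1, (k, v) :: r.2.2)

theorem pvFill_len (lim : Int) : ∀ (s : Int) (xs : List (String × Int)),
    (pvFill lim s xs).2.2.length ≤ xs.length := by
  intro s xs
  induction xs generalizing s with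
  | nil => simp [pvFill]
  | cons hd tl ih =>
    obtain ⟨k, v⟩ := hd
    by_cases h : s + v ≤ lim <;> simp [pvFill, h]
    · exact (ih (s + v)).trans (Nat.le_succ _)
    · exact ih s

-- common reference form: the trips, produced by peeling one greedy trip at a time
def pvGT (lim : Int) : List (String × Int) → List (Int × List String)
  | [] => []
  | (k, v) :: xs =>
    let w := pvFill lim v xs
    (w.1, k :: w.2.1) :: pvGT lim w.2.2
termination_by xs => xs.length
decreasing_by
  simpa using Nat.lt_succ_of_le (pvFill_len lim v xs)

theorem pvFill_taken_subset (lim : Int) : ∀ (s : Int) (xs : List (String × Int)) (x : String),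
    x ∈ (pvFill lim s xs).2.1 → x ∈ xs.map Prod.fst := by
  intro s xs
  induction xs generalizing s with
  | nil => simp [pvFill]
  | cons hd tl ih =>
    obtain ⟨k, v⟩ := hd
    intro x
    by_cases h : s + v ≤ lim <;> simp [pvFill, h]
    · rintro (rfl | hx)
      · exact Or.inl rfl
      · exact Or.inr (by simpa using ih (s + v) x hx)
    · intro hx; exact Or.inr (by simpa using ih s x hx)

theorem pvFill_residual (lim : Int) : ∀ (s : Int) (xs : List (String × Int)),
    (xs.map Prod.fst).Nodup →
    (pvFill lim s xs).2.2 = xs.filter (fun kv => decide (kv.1 ∉ (pvFill lim s xs).2.1)) := by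
  intro s xs
  induction xs generalizing s with
  | nil => simp [pvFill]
  | cons hd tl ih =>
    obtain ⟨k, v⟩ := hd
    intro hnd
    rw [List.map_cons, List.nodup_cons] at hnd
    obtain ⟨hk, hndtl⟩ := hnd
    by_cases h : s + v ≤ lim
    · simp only [pvFill, if_pos h, List.filter_cons]
      have hkmem : (decide (((k, v).1 : String) ∉ (k, v).1 :: (pvFill lim (s + v) tl).2.1)) = false := by
        simp
      rw [hkmem, ih (s + v) hndtl]
      apply List.filter_congr
      intro x hx
      have hxk : x.1 ≠ k := fun he =>
        hk (he ▸ List.mem_map.mpr ⟨x, hx, rfl⟩)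
      simp [hxk]
    · simp only [pvFill, if_neg h, List.filter_cons]
      have hknot : k ∉ (pvFill lim s tl).2.1 := fun hmem => hk (pvFill_taken_subset lim s tl k hmem)
      have hkmem : (decide (((k, v).1 : String) ∉ (pvFill lim s tl).2.1)) = true := by
        simpa using hknot
      rw [hkmem, ih s hndtl]
      simp

-- B side: one first-fit pass equals the peel form
theorem ff_split (lim : Int) : ∀ (xs : List (String × Int)) (t : Int × List String)
    (ts : List (Int × List String)),
    xs.foldl (fun trips kv => firstFit lim trips kv.1 kv.2) (t :: ts)
      = ((pvFill lim t.1 xs).1, t.2 ++ (pvFill lim t.1 xs).2.1)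
        :: ((pvFill lim t.1 xs).2.2).foldl (fun trips kv => firstFit lim trips kv.1 kv.2) ts := by
  intro xs
  induction xs with
  | nil => intro t ts; simp [pvFill]
  | cons hd tl ih =>
    obtain ⟨k, v⟩ := hd
    intro t ts
    by_cases h : t.1 + v ≤ lim
    · simp only [List.foldl_cons, firstFit, if_pos h, pvFill]
      rw [ih (t.1 + v, t.2 ++ [k]) ts]
      simp
    · simp only [List.foldl_cons, firstFit, if_neg h, pvFill]
      rw [ih t (firstFit lim ts k v)]

theorem B_eq_GT (lim : Int) : ∀ (n : Nat) (xs : List (String × Int)), xs.length ≤ n →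
    xs.foldl (fun trips kv => firstFit lim trips kv.1 kv.2) [] = pvGT lim xs := by
  intro n
  induction n with
  | zero =>
    intro xs hlen
    rw [List.length_eq_zero_iff.mp (Nat.le_zero.mp hlen)]
    simp [pvGT]
  | succ n ih =>
    intro xs hlen
    match xs with
    | [] => simp [pvGT]
    | (k, v) :: tl =>
      simp only [List.foldl_cons, firstFit]
      rw [ff_split lim tl ((v : Int), [k]) []]
      rw [ih ((pvFill lim v tl).2.2)
        (le_trans (pvFill_len lim v tl) (Nat.le_of_succ_le_succ hlen))]
      simp [pvGT]

-- A side: the nested scan with `chec` equals the peel form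
theorem innerA_eq (lim : Int) (lead : String × Int) :
    ∀ (X : List (String × Int)) (s : Int) (trip ch : List String),
    (X.map Prod.fst).Nodup → (∀ kv ∈ X, kv.2 ≤ lim) → lead.2 ≤ lim → lead.1 ∈ ch →
    X.foldl (innerStepA lim lead) (s, trip, ch)
      = ((pvFill lim s (X.filter (fun kv => decide (kv.1 ∉ ch)))).1,
         trip ++ (pvFill lim s (X.filter (fun kv => decide (kv.1 ∉ ch)))).2.1,
         ch ++ (pvFill lim s (X.filter (fun kv => decide (kv.1 ∉ ch)))).2.1) := by
  intro X
  induction X with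
  | nil => intro s trip ch _ _ _ _; simp [pvFill]
  | cons hd tl ih =>
    obtain ⟨k, v⟩ := hd
    intro s trip ch hnd hv hlead hleadch
    rw [List.map_cons, List.nodup_cons] at hnd
    obtain ⟨hk, hndtl⟩ := hnd
    have hvtl : ∀ kv ∈ tl, kv.2 ≤ lim := fun kv hm => hv kv (List.mem_cons_of_mem _ hm)
    have hvk : v ≤ lim := hv (k, v) (List.mem_cons_self ..)
    by_cases hkch : k ∈ ch
    · have hstep : innerStepA lim lead (s, trip, ch) (k, v) = (s, trip, ch) := by
        simp only [innerStepA]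
        rw [if_neg]
        rintro ⟨-, -, -, habs⟩
        exact habs hkch
      rw [List.foldl_cons, hstep, ih s trip ch hndtl hvtl hlead hleadch]
      simp [hkch]
    · have hne : lead.1 ≠ k := fun he => hkch (he ▸ hleadch)
      have hstep : innerStepA lim lead (s, trip, ch) (k, v) =
          (if s + v ≤ lim then (s + v, trip ++ [k], ch ++ [k]) else (s, trip, ch)) := by
        simp only [innerStepA]
        rw [if_pos ⟨hlead, hvk, hne, hkch⟩]
      have hfiltl : ∀ (δ : List String), (∀ x ∈ δ, x ∉ tl.map Prod.fst) →
          tl.filter (fun kv => decide (kv.1 ∉ ch ++ δ)) =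
          tl.filter (fun kv => decide (kv.1 ∉ ch)) := by
        intro δ hδ
        apply List.filter_congr
        intro x hx
        have : x.1 ∉ δ := fun hmem => hδ x.1 hmem (List.mem_map.mpr ⟨x, hx, rfl⟩)
        simp [this]
      have hfilcons : ((k, v) :: tl).filter (fun kv => decide (kv.1 ∉ ch)) =
          (k, v) :: tl.filter (fun kv => decide (kv.1 ∉ ch)) := by
        simp [List.filter_cons, hkch]
      by_cases hfit : s + v ≤ lim
      · rw [List.foldl_cons, hstep, if_pos hfit,
          ih (s + v) (trip ++ [k]) (ch ++ [k]) hndtl hvtl hlead (List.mem_append_left _ hleadch),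
          hfiltl [k] (by simpa using hk), hfilcons]
        simp [pvFill, hfit]
      · rw [List.foldl_cons, hstep, if_neg hfit,
          ih s trip ch hndtl hvtl hlead hleadch, hfilcons]
        simp [pvFill, hfit]

theorem filter_notmem_append (Z : List (String × Int)) (ch δ : List String) :
    Z.filter (fun kv => decide (kv.1 ∉ ch ++ δ)) =
    (Z.filter (fun kv => decide (kv.1 ∉ ch))).filter (fun kv => decide (kv.1 ∉ δ)) := by
  rw [List.filter_filter]
  apply List.filter_congr
  intro x _
  by_cases h1 : x.1 ∈ ch <;> by_cases h2 : x.1 ∈ δ <;> simp [h1, h2]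

theorem filter_notmem_of_keys_disjoint (Z : List (String × Int)) (δ : List String)
    (h : ∀ x ∈ Z, x.1 ∉ δ) : Z.filter (fun kv => decide (kv.1 ∉ δ)) = Z := by
  rw [List.filter_eq_self]
  intro x hx
  simp [h x hx]

theorem outerA_eq (lim : Int) (L : List (String × Int))
    (hnd : (L.map Prod.fst).Nodup) (hv : ∀ kv ∈ L, kv.2 ≤ lim) :
    ∀ (M : List (String × Int)), M.Sublist L →
    ∀ (ch : List String) (s0 : Int) (acc : List (List String)),
    L.filter (fun kv => decide (kv.1 ∉ ch)) = M.filter (fun kv => decide (kv.1 ∉ ch)) →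
    (M.foldl (outerStepA lim L) (s0, ch, acc)).2.2
      = acc ++ (pvGT lim (M.filter (fun kv => decide (kv.1 ∉ ch)))).map (fun t => t.2) := by
  intro M
  induction M with
  | nil => intro _ ch s0 acc _; simp [pvGT]
  | cons hd M' ih =>
    obtain ⟨k, v⟩ := hd
    intro hsub ch s0 acc H
    have hsub' : M'.Sublist L := (List.sublist_cons_self (k, v) M').trans hsub
    have hndM : (((k, v) :: M').map Prod.fst).Nodup := (hsub.map Prod.fst).nodup hnd
    rw [List.map_cons, List.nodup_cons] at hndM
    obtain ⟨hkM', hndM'⟩ := hndM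
    by_cases hkch : k ∈ ch
    · have hstep : outerStepA lim L (s0, ch, acc) (k, v) = (s0, ch, acc) := by
        simp [outerStepA, hkch]
      have hfm : (((k, v) :: M').filter (fun kv => decide (kv.1 ∉ ch))) =
          M'.filter (fun kv => decide (kv.1 ∉ ch)) := by
        simp [List.filter_cons, hkch]
      rw [List.foldl_cons, hstep, ih hsub' ch s0 acc (H.trans hfm), hfm]
    · -- leader case
      have hkL : (k, v) ∈ L := hsub.subset (List.mem_cons_self ..)
      have hvk : v ≤ lim := hv (k, v) hkL
      set R' := M'.filter (fun kv => decide (kv.1 ∉ ch)) with hR'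
      have hkR' : ∀ x ∈ R', x.1 ∉ ([k] : List String) := by
        intro x hx
        have : x.1 ∈ M'.map Prod.fst := List.mem_map.mpr ⟨x, (List.mem_filter.mp hx).1, rfl⟩
        simp only [List.mem_singleton]
        exact fun he => hkM' (he ▸ this)
      have hfilcons : (((k, v) :: M').filter (fun kv => decide (kv.1 ∉ ch))) =
          (k, v) :: R' := by
        simp [List.filter_cons, hkch, hR']
      have F1 : L.filter (fun kv => decide (kv.1 ∉ ch ++ [k])) = R' := by
        rw [filter_notmem_append, H, hfilcons]
        have : ((k, v) :: R').filter (fun kv => decide (kv.1 ∉ ([k] : List String))) =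
            R'.filter (fun kv => decide (kv.1 ∉ ([k] : List String))) := by
          simp [List.filter_cons]
        rw [this, filter_notmem_of_keys_disjoint R' [k] hkR']
      set w := pvFill lim v R' with hw
      have hndR' : (R'.map Prod.fst).Nodup :=
        ((List.filter_sublist (l := M')).map Prod.fst).nodup hndM'
      have hstep : outerStepA lim L (s0, ch, acc) (k, v) =
          (w.1, (ch ++ [k]) ++ w.2.1, acc ++ [[k] ++ w.2.1]) := by
        simp only [outerStepA, if_neg hkch]
        rw [innerA_eq lim (k, v) L v [k] (ch ++ [k]) hnd hv hvk
          (by simp : (k, v).1 ∈ ch ++ [k]), F1]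
      have hch' : (ch ++ [k]) ++ w.2.1 = ch ++ (k :: w.2.1) := by
        simp
      have hsplit : ∀ (Z : List (String × Int)),
          Z.filter (fun kv => decide (kv.1 ∉ ch ++ (k :: w.2.1))) =
          (Z.filter (fun kv => decide (kv.1 ∉ ch))).filter
            (fun kv => decide (kv.1 ∉ (k :: w.2.1))) :=
        fun Z => filter_notmem_append Z ch (k :: w.2.1)
      have hRres : R'.filter (fun kv => decide (kv.1 ∉ (k :: w.2.1))) = w.2.2 := by
        have h1 : R'.filter (fun kv => decide (kv.1 ∉ (k :: w.2.1))) =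
            R'.filter (fun kv => decide (kv.1 ∉ w.2.1)) := by
          apply List.filter_congr
          intro x hx
          have hxk : x.1 ≠ k := by simpa using hkR' x hx
          simp [hxk]
        rw [h1, ← pvFill_residual lim v R' hndR']
      have hMres : M'.filter (fun kv => decide (kv.1 ∉ ch ++ (k :: w.2.1))) = w.2.2 := by
        rw [hsplit, ← hR', hRres]
      have HL : L.filter (fun kv => decide (kv.1 ∉ ch ++ (k :: w.2.1))) = w.2.2 := by
        rw [hsplit, H, hfilcons]
        have : ((k, v) :: R').filter (fun kv => decide (kv.1 ∉ (k :: w.2.1))) =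
            R'.filter (fun kv => decide (kv.1 ∉ (k :: w.2.1))) := by
          simp [List.filter_cons]
        rw [this, hRres]
      rw [List.foldl_cons, hstep, hch',
        ih hsub' (ch ++ (k :: w.2.1)) w.1 (acc ++ [[k] ++ w.2.1]) (HL.trans hMres.symm),
        hMres, hfilcons]
      have hGT : pvGT lim ((k, v) :: R') = (w.1, k :: w.2.1) :: pvGT lim w.2.2 := by
        rw [pvGT]
      rw [hGT]
      simp

theorem foldl_insert_if (lim : Int) :
    ∀ (l : List (String × Int)) (sd : PySem.Dict String Int),
    l.foldl (fun sd kv => if kv.2 ≤ lim then sd.insert kv.1 kv.2 else sd) sd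
      = (l.filter (fun kv => decide (kv.2 ≤ lim))).foldl (fun sd kv => sd.insert kv.1 kv.2) sd := by
  intro l
  induction l with
  | nil => intro sd; rfl
  | cons hd tl ih =>
    intro sd
    by_cases h : hd.2 ≤ lim <;> simp [List.filter_cons, h, ih]

theorem rescue_people_main (smarties : List (String × Int)) (limit_iq : Int) :
    rescue_people smarties limit_iq = rescue_people_alt smarties limit_iq := by
  simp only [rescue_people, rescue_people_alt]
  by_cases hsz : (PySem.Dict.ofList smarties).size = 0
  · have hitems : (PySem.Dict.ofList smarties).items = [] := by
      have : (PySem.Dict.ofList smarties).items.length = 0 := hsz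
      exact List.length_eq_zero_iff.mp this
    have hS : PySem.List.sorted2 (PySem.Dict.ofList smarties).items
        (fun item => -item.2) (fun item => item.1) = [] := by
      have := PySem.List.sorted2_perm (PySem.Dict.ofList smarties).items
        (fun item : String × Int => -item.2) (fun item : String × Int => item.1) false
      rw [hitems]
      exact (PySem.List.sorted2_perm ([] : List (String × Int))
        (fun item : String × Int => -item.2) (fun item : String × Int => item.1) false).eq_nil
    simp [hsz, hS]
  · rw [if_neg hsz]
    set S := PySem.List.sorted2 (PySem.Dict.ofList smarties).items
      (fun item => -item.2) (fun item => item.1) with hSdef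
    set I := S.filter (fun kv => decide (kv.2 ≤ limit_iq)) with hIdef
    have hndS : (S.map Prod.fst).Nodup := by
      have hperm : S.Perm (PySem.Dict.ofList smarties).items :=
        PySem.List.sorted2_perm _ _ _ false
      have hkeys := PySem.Dict.nodup_keys_ofList (κ := String) (ν := Int) smarties
      exact (hperm.map Prod.fst).nodup_iff.mpr (by simpa [PySem.Dict.keys] using hkeys)
    have hndI : (I.map Prod.fst).Nodup :=
      ((List.filter_sublist (l := S)).map Prod.fst).nodup hndS
    have hI : ((S.foldl (fun sd kv => if kv.2 ≤ limit_iq then sd.insert kv.1 kv.2 else sd)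
        PySem.Dict.empty).items) = I := by
      rw [foldl_insert_if, ← hIdef]
      rw [PySem.Dict.items_foldl_insert_fresh I (fun a => a.1) (fun a => a.2)
        PySem.Dict.empty (fun a _ => PySem.Dict.contains_empty _) hndI]
      simp [PySem.Dict.empty, PySem.Dict.items]
    have hv : ∀ kv ∈ I, kv.2 ≤ limit_iq := by
      intro kv hm
      have := (List.mem_filter.mp hm).2
      simpa using this
    have hIfull : I.filter (fun kv => decide (kv.1 ∉ ([] : List String))) = I := by
      apply List.filter_eq_self.mpr
      intro x _
      simp
    have hA := outerA_eq limit_iq I hndI hv I (List.Sublist.refl I) [] 0 [] rfl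
    rw [hIfull] at hA
    have hB := B_eq_GT limit_iq I.length I le_rfl
    rw [hI, hA, hB]
    simp

-- ===== VERDICT (by name: the statement is the Claim_ definition above) =====
theorem rescue_people_spec : Claim_equal_rescue_people := by
  intro smarties limit_iq _
  unfold Spec_rescue_people
  exact rescue_people_main smarties limit_iq
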